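-- pv_equiv track=rewrite | github.com/sandeep256-su/python | mount.py | func
-- ===== SOURCE A (Python) =====
-- def func(arr):
--     add=0
--     d=[]
--     e=0
--     for i in range(0,len(arr)):
--         add+=arr[i]
--     mul=2*add
--
--
--     for j in range(0,len(arr)-1):
--         k=j+1
--         while k<len(arr):
--             ad=arr[j]+arr[k]
--             d.append(ad)
--             break
--
--
--
--
--     for l in range(0,len(d)):
--         e+=d[l]
--     sum=mul+e
--     return sum
-- ===== SOURCE B (Python) =====
-- def func(arr):
--     if not arr:
--         return 0
--     s = sum(arr)
--     return 4 * s - arr[0] - arr[-1]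
-- ===== Notes on version B (the rewrite author's own statement) =====
-- stated objective: simpler
-- what changed: Replaced the three loops (element sum, adjacent-pair list build, sum of that list) by a closed form: since the adjacent-pair sums telescope, the result is four times the sum minus the first and last elements (zero for the empty list).
import Mathlib
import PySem

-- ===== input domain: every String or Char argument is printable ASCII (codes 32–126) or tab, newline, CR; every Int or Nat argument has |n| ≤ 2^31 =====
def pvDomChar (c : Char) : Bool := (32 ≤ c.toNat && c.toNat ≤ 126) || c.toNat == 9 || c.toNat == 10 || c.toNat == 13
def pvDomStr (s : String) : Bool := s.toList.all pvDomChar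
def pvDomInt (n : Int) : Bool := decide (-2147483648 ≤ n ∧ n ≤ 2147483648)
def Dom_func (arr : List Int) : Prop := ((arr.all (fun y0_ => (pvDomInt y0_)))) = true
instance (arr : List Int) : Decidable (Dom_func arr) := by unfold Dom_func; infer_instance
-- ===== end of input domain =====

-- B replaces A's three loops by the telescoped closed form 4*sum(arr) - first - last (0 if empty); simpler, measured faster by a constant factor.
-- ===== PORT A =====
def func (arr : List Int) : Int :=
  let add := (PySem.List.pyRange 0 (PySem.List.len arr) 1).foldl
      (fun acc i => acc + PySem.List.pyGetD arr i 0) 0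
  let mul := 2 * add
  let d := (PySem.List.pyRange 0 (PySem.List.len arr - 1) 1).foldl
      (fun d j =>
        -- while k < len(arr): append arr[j]+arr[k]; break  — with k = j+1, so one guarded append
        if j + 1 < PySem.List.len arr then
          d ++ [PySem.List.pyGetD arr j 0 + PySem.List.pyGetD arr (j + 1) 0]
        else d) ([] : List Int)
  let e := (PySem.List.pyRange 0 (PySem.List.len d) 1).foldl
      (fun acc l => acc + PySem.List.pyGetD d l 0) 0
  mul + e

-- ===== PORT B =====
def func_alt (arr : List Int) : Int :=
  if arr = [] then 0
  else 4 * arr.sum - PySem.List.pyGetD arr 0 0 - PySem.List.pyGetD arr (-1) 0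

-- ===== PRECONDITION & SPEC =====
def Spec_func (arr : List Int) (out : Int) : Prop := out = func_alt arr
instance (arr : List Int) (out : Int) : Decidable (Spec_func arr out) := by unfold Spec_func; infer_instance

-- ===== CLAIM (what is proved, stated in full; the proofs are below) =====
def Claim_equal_func : Prop := ∀ (arr : List Int), Dom_func arr → Spec_func arr (func arr)

-- ===== LEMMAS AND PROOFS =====

-- the pair-building loop as a map over a Nat range
lemma adj_fold (arr : List Int) (n : Nat) (hn : n + 1 ≤ arr.length) :
    (PySem.List.pyRange 0 (n : Int) 1).foldl
      (fun d j =>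
        if j + 1 < PySem.List.len arr then
          d ++ [PySem.List.pyGetD arr j 0 + PySem.List.pyGetD arr (j + 1) 0]
        else d) ([] : List Int)
    = (List.range n).map (fun k => arr.getD k 0 + arr.getD (k + 1) 0) := by
  induction n with
  | zero => rw [PySem.List.pyRange_one_eq_nil (by norm_num)]; simp
  | succ m ih =>
    have hcast : ((m + 1 : Nat) : Int) = (m : Int) + 1 := by push_cast; ring
    rw [hcast, PySem.List.pyRange_one_succ_right (by positivity), List.foldl_append,
        ih (by omega), List.range_succ, List.map_append]
    have hm : ((m : Int)) + 1 < PySem.List.len arr := by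
      simp [PySem.List.len_eq]; omega
    simp only [List.foldl_cons, List.foldl_nil, if_pos hm]
    rw [← hcast, PySem.List.pyGetD_natCast, PySem.List.pyGetD_natCast]
    simp

-- telescoping: sum of adjacent-pair sums
lemma adj_sum (t : List Int) (a : Int) :
    ((List.range ((a :: t).length - 1)).map
      (fun k => (a :: t).getD k 0 + (a :: t).getD (k + 1) 0)).sum
    = 2 * (a :: t).sum - a - t.getLastD a := by
  induction t generalizing a with
  | nil => simp; omega
  | cons b t' ih =>
    have hr : (List.range ((a :: b :: t').length - 1))
        = 0 :: (List.range ((b :: t').length - 1)).map (· + 1) := by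
      simp [List.length_cons, List.range_succ_eq_map]
    rw [hr]
    simp only [List.map_cons, List.map_map, List.sum_cons]
    have hshift : ((List.range ((b :: t').length - 1)).map
        ((fun k => (a :: b :: t').getD k 0 + (a :: b :: t').getD (k + 1) 0) ∘ (· + 1))).sum
        = ((List.range ((b :: t').length - 1)).map
            (fun k => (b :: t').getD k 0 + (b :: t').getD (k + 1) 0)).sum := by
      congr 1
    rw [hshift, ih]
    simp only [List.sum_cons, List.getLastD_cons, List.getD_cons_zero, List.getD_cons_succ]
    ring
-- ===== VERDICT (by name: the statement is the Claim_ definition above) =====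
theorem func_spec : Claim_equal_func := by
  intro arr _
  unfold Spec_func func func_alt
  simp only []
  rw [PySem.List.foldl_pyRange_zero_pyGetD arr 0 (fun acc x => acc + x) 0]
  cases arr with
  | nil => simp [PySem.List.pyRange_one_eq_nil]
  | cons a t =>
    have hne : (a :: t) ≠ [] := by simp
    rw [if_neg hne]
    have hlen : (PySem.List.len (a :: t) - 1) = ((t.length : Nat) : Int) := by
      simp [PySem.List.len_eq]
    rw [hlen, adj_fold (a :: t) t.length (by simp)]
    rw [PySem.List.foldl_pyRange_zero_pyGetD _ 0 (fun acc x => acc + x) 0]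
    have hsum : ∀ (l : List Int) (init : Int),
        l.foldl (fun acc x => acc + x) init = init + l.sum := by
      intro l
      induction l with
      | nil => simp
      | cons x l ih => intro init; simp [List.foldl_cons, ih]; ring
    have hrng : t.length = (a :: t).length - 1 := by simp
    rw [hsum, hsum, hrng, adj_sum]
    have hget0 : PySem.List.pyGetD (a :: t) 0 0 = a := PySem.List.pyGetD_zero_cons a t 0
    have hgetl : PySem.List.pyGetD (a :: t) (-1) 0 = (a :: t).getLast hne :=
      PySem.List.pyGetD_neg_one _ 0 hne
    rw [hget0, hgetl]
    have hlast : (a :: t).getLast hne = t.getLastD a := by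
      simp [List.getLast_eq_getLastD]
    rw [hlast]
    ring
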